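-- pv_equiv track=rewrite | github.com/ameer-rah/RUPlanner | backend/app/core/planner.py | _resolve_choice_requirement
-- ===== SOURCE A (Python) =====
-- from typing import Dict, List, Optional, Set, Tuple
--
-- def _resolve_choice_requirement(req: Dict, completed: Set[str], catalog: Dict) -> Optional[str]:
--     """
--     For a 'choose one of these options' requirement (e.g. sci_intro_requirement),
--     return the best option: the first already-completed one (already satisfied),
--     or else the first available option in the catalog.
--     Returns None if the requirement is missing or already satisfied.
--     """
--     if not req:
--         return None
--     options: List[str] = req.get("options", [])
--     if not options:
--         return None
--     # Already satisfied?
--     if any(o in completed for o in options):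
--         return None
--     # Return first catalog-available option.
--     return next((o for o in options if o in catalog), None)
-- ===== SOURCE B (Python) =====
-- def _resolve_choice_requirement(req, completed, catalog):
--     """Inverted strategy: index each option by its first position (bailing out on a
--     completed option), then scan the CATALOG as a min-by-position pass, returning
--     the catalog key with the smallest option position."""
--     if not req:
--         return None
--     options = req.get("options", [])
--     pos = {}
--     for i, o in enumerate(options):
--         if o in completed:
--             return None
--         if o not in pos:
--             pos[o] = i
--     best = None
--     best_i = len(options)
--     for k in catalog:
--         i = pos.get(k, len(options))
--         if i < best_i:
--             best, best_i = k, i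
--     return best
-- ===== Notes on version B (the rewrite author's own statement) =====
-- stated objective: alternative
-- what changed: Inverts the search: instead of scanning options for the first one present in the catalog, B builds a first-position index of the options (bailing out on a completed one) and then scans the CATALOG with a min-by-position pass, returning the catalog key with the smallest option position.
import Mathlib
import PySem

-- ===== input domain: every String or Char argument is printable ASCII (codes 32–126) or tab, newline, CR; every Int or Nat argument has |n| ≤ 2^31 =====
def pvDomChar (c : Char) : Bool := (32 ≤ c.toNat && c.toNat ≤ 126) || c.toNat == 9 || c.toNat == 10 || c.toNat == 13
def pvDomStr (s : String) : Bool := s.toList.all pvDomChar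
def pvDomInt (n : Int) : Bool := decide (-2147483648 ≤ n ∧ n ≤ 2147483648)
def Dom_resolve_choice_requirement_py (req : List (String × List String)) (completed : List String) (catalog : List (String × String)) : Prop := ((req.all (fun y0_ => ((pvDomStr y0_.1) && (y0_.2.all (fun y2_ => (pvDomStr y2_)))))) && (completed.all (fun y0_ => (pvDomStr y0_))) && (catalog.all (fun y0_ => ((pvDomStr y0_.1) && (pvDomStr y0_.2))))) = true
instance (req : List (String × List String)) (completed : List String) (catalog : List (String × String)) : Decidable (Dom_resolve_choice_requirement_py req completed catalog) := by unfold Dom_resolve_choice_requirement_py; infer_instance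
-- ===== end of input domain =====

-- B inverts the search: it indexes options by first position and scans the CATALOG with a
-- min-by-position pass, instead of scanning options for the first one in the catalog.
-- Return-value equivalence; neither side mutates its arguments.

-- ===== PORT A =====
-- A: guard on empty dict, dict.get("options", []), an any() scan over completed,
-- then next() over a generator: first option present in the catalog.
def resolve_choice_requirement_py (req : List (String × List String)) (completed : List String) (catalog : List (String × String)) : Option String :=
  if req = [] then none
  else
    let options : List String := ((req.find? (fun kv => kv.1 == "options")).map Prod.snd).getD []
    if options = [] then none
    else if options.any (fun o => completed.contains o) then none
    else options.find? (fun o => catalog.any (fun kv => kv.1 == o))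

-- ===== PORT B =====
-- B helper 1: the enumerate loop of Source B — early None on a completed option,
-- otherwise record each option's first position in the dict `pos`.
def pvIdxLoop (completed : List String) : List String → Nat → PySem.Dict String Nat → Option (PySem.Dict String Nat)
  | [], _, pos => some pos
  | o :: rest, i, pos =>
    if completed.contains o then none
    else pvIdxLoop completed rest (i + 1) (if pos.contains o then pos else pos.insert o i)

-- B helper 2: the catalog loop of Source B — min-by-position scan over catalog keys.
def pvCatLoop (pos : PySem.Dict String Nat) (L : Nat) : List (String × String) → Option String × Nat → Option String × Nat
  | [], st => st
  | kv :: rest, st =>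
    let i := pos.getD kv.1 L
    pvCatLoop pos L rest (if i < st.2 then (some kv.1, i) else st)

def resolve_choice_requirement_py_alt (req : List (String × List String)) (completed : List String) (catalog : List (String × String)) : Option String :=
  if req = [] then none
  else
    let options : List String := ((req.find? (fun kv => kv.1 == "options")).map Prod.snd).getD []
    match pvIdxLoop completed options 0 PySem.Dict.empty with
    | none => none
    | some pos => (pvCatLoop pos options.length catalog (none, options.length)).1

-- ===== PRECONDITION & SPEC =====
def Spec_resolve_choice_requirement_py (req : List (String × List String)) (completed : List String) (catalog : List (String × String)) (out : Option String) : Prop := out = resolve_choice_requirement_py_alt req completed catalog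
instance (req : List (String × List String)) (completed : List String) (catalog : List (String × String)) (out : Option String) : Decidable (Spec_resolve_choice_requirement_py req completed catalog out) := by unfold Spec_resolve_choice_requirement_py; infer_instance

-- ===== CLAIM (what is proved, stated in full; the proofs are below) =====
def Claim_equal_resolve_choice_requirement_py : Prop := ∀ (req : List (String × List String)) (completed : List String) (catalog : List (String × String)), Dom_resolve_choice_requirement_py req completed catalog → Spec_resolve_choice_requirement_py req completed catalog (resolve_choice_requirement_py req completed catalog)

-- ===== LEMMAS AND PROOFS =====

-- The pure option-indexing fold (the idx loop with the completed check stripped).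
def pvPosOf : List String → Nat → PySem.Dict String Nat → PySem.Dict String Nat
  | [], _, pos => pos
  | o :: rest, i, pos => pvPosOf rest (i + 1) (if pos.contains o then pos else pos.insert o i)

theorem idxLoop_none (completed : List String) (opts : List String) :
    ∀ i pos, opts.any (fun o => completed.contains o) = true →
      pvIdxLoop completed opts i pos = none := by
  induction opts with
  | nil => simp
  | cons o rest ih =>
    intro i pos h
    cases hc : completed.contains o with
    | true => simp only [pvIdxLoop, hc, if_true]
    | false =>
      simp only [List.any_cons, hc, Bool.false_or] at h
      simp only [pvIdxLoop, hc, Bool.false_eq_true, if_false, ih _ _ h]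

theorem idxLoop_some (completed : List String) (opts : List String) :
    ∀ i pos, opts.any (fun o => completed.contains o) = false →
      pvIdxLoop completed opts i pos = some (pvPosOf opts i pos) := by
  induction opts with
  | nil => simp [pvIdxLoop, pvPosOf]
  | cons o rest ih =>
    intro i pos h
    simp only [List.any_cons, Bool.or_eq_false_iff] at h
    simp only [pvIdxLoop, pvPosOf, h.1, Bool.false_eq_true, if_false, ih _ _ h.2]

theorem posOf_get? (opts : List String) :
    ∀ (i : Nat) (pos : PySem.Dict String Nat) (k : String),
      (pvPosOf opts i pos).get? k =
        ((pos.get? k).orElse (fun _ => (opts.findIdx? (fun o => o == k)).map (i + ·))) := by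
  induction opts with
  | nil => intro i pos k; cases h : pos.get? k <;> simp [pvPosOf, Option.orElse, h]
  | cons o rest ih =>
    intro i pos k
    by_cases hk : k = o
    · subst hk
      by_cases hc : pos.contains k = true
      · have hs : (pos.get? k).isSome := by
          rw [PySem.Dict.contains_eq_isSome_get?] at hc; exact hc
        obtain ⟨v, hv⟩ := Option.isSome_iff_exists.mp hs
        simp [pvPosOf, hc, ih, hv, Option.orElse]
      · simp only [Bool.not_eq_true] at hc
        have h1 : pos.get? k = none := by
          rw [PySem.Dict.contains_eq_isSome_get?] at hc
          exact Option.not_isSome_iff_eq_none.mp (by simp [hc])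
        simp [pvPosOf, hc, ih, h1, List.findIdx?_cons, Option.orElse]
    · have hb : (o == k) = false := by simp; exact fun h => hk h.symm
      by_cases hc : pos.contains o = true
      · simp [pvPosOf, hc, ih, List.findIdx?_cons, hb, Option.map_map]
        cases h : pos.get? k <;> simp
        · congr 1; funext n; simp only [Function.comp]; omega
      · simp only [Bool.not_eq_true] at hc
        have h2 : (pos.insert o i).get? k = pos.get? k := by
          simp [PySem.Dict.get?_insert, hk]
        simp [pvPosOf, hc, ih, h2, List.findIdx?_cons, hb, Option.map_map]
        cases h : pos.get? k <;> simp
        · congr 1; funext n; simp only [Function.comp]; omega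

theorem findIdx?_lt {α : Type} (p : α → Bool) (xs : List α) :
    ∀ n, xs.findIdx? p = some n → n < xs.length := by
  induction xs with
  | nil => simp
  | cons x xs ih =>
    intro n h
    rw [List.findIdx?_cons] at h
    by_cases hp : p x = true
    · simp [hp] at h
      subst h
      simp
    · simp [hp] at h
      obtain ⟨m, hm, rfl⟩ := h
      have := ih m hm
      simp
      omega

theorem findIdx?_beq_getElem (k : String) (xs : List String) :
    ∀ n, xs.findIdx? (fun o => k == o) = some n → xs[n]? = some k := by
  induction xs with
  | nil => simp
  | cons x xs ih =>
    intro n h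
    rw [List.findIdx?_cons] at h
    by_cases hp : (k == x) = true
    · simp [hp] at h
      subst h
      simp [(beq_iff_eq).mp hp]
    · simp [hp] at h
      obtain ⟨m, hm, rfl⟩ := h
      simpa using ih m hm

theorem find?_eq_bind {α : Type} (p : α → Bool) (xs : List α) :
    xs.find? p = (xs.findIdx? p).bind (fun n => xs[n]?) := by
  induction xs with
  | nil => simp
  | cons x xs ih =>
    rw [List.findIdx?_cons]
    by_cases hp : p x = true
    · simp [hp]
    · simp only [List.find?_cons, hp, if_neg, Bool.not_eq_true] at *
      simp [ih, Option.bind_map]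

theorem findIdx?_or {α : Type} (p q : α → Bool) (xs : List α) :
    xs.findIdx? (fun o => p o || q o) =
      match xs.findIdx? p, xs.findIdx? q with
      | none, b => b
      | some a, none => some a
      | some a, some b => some (min a b) := by
  induction xs with
  | nil => simp
  | cons x xs ih =>
    rw [List.findIdx?_cons, List.findIdx?_cons, List.findIdx?_cons, ih]
    by_cases hp : p x = true <;> by_cases hq : q x = true <;>
      simp [hp, hq] <;>
      cases ha : xs.findIdx? p <;> cases hb : xs.findIdx? q <;>
        simp [Nat.succ_min_succ]

-- The canonical loop state after having seen the catalog keys K.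
def pvState (opts K : List String) : Option String × Nat :=
  match opts.findIdx? (fun o => K.any (fun k' => k' == o)) with
  | none => (none, opts.length)
  | some n => (opts[n]?, n)

theorem catLoop_spec (pos : PySem.Dict String Nat) (opts : List String)
    (hpos : ∀ k, pos.getD k opts.length = (opts.findIdx? (fun o => k == o)).getD opts.length) :
    ∀ (cat : List (String × String)) (K : List String),
      pvCatLoop pos opts.length cat (pvState opts K) =
        pvState opts (K ++ cat.map Prod.fst) := by
  intro cat
  induction cat with
  | nil => intro K; simp [pvCatLoop]
  | cons kv rest ih =>
    intro K
    have key : (fun o => (K ++ [kv.1]).any (fun k' => k' == o)) =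
        (fun o => K.any (fun k' => k' == o) || (kv.1 == o)) := by
      funext o; simp [List.any_append]
    have harg : (if pos.getD kv.1 opts.length < (pvState opts K).2
          then (some kv.1, pos.getD kv.1 opts.length) else pvState opts K)
        = pvState opts (K ++ [kv.1]) := by
      unfold pvState
      rw [key, findIdx?_or, hpos kv.1]
      cases ha : opts.findIdx? (fun o => K.any (fun k' => k' == o)) with
      | none =>
        cases hb : opts.findIdx? (fun o => kv.1 == o) with
        | none => simp
        | some m =>
          have hm := findIdx?_lt _ _ _ hb
          have hg := findIdx?_beq_getElem _ _ _ hb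
          have hge : opts[m] = kv.1 := by
            rw [List.getElem?_eq_getElem hm] at hg
            exact Option.some.inj hg
          simp [hm, hge]
      | some n =>
        have hn := findIdx?_lt _ _ _ ha
        cases hb : opts.findIdx? (fun o => kv.1 == o) with
        | none => simp [Nat.not_lt.mpr (Nat.le_of_lt hn)]
        | some m =>
          have hm := findIdx?_lt _ _ _ hb
          have hg := findIdx?_beq_getElem _ _ _ hb
          have hge : opts[m] = kv.1 := by
            rw [List.getElem?_eq_getElem hm] at hg
            exact Option.some.inj hg
          by_cases hmn : m < n
          · simp [hmn, Nat.min_eq_right (Nat.le_of_lt hmn), hg]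
          · simp [hmn, Nat.min_eq_left (by omega : n ≤ m)]
    simp only [pvCatLoop]
    rw [harg, ih (K ++ [kv.1])]
    simp

-- ===== VERDICT (by name: the statement is the Claim_ definition above) =====
theorem resolve_choice_requirement_py_spec : Claim_equal_resolve_choice_requirement_py := by
  intro req completed catalog _
  unfold Spec_resolve_choice_requirement_py resolve_choice_requirement_py resolve_choice_requirement_py_alt
  by_cases hreq : req = []
  · simp [hreq]
  · simp only [hreq, if_false]
    set opts : List String := ((req.find? (fun kv => kv.1 == "options")).map Prod.snd).getD [] with hopts
    by_cases hsat : opts.any (fun o => completed.contains o) = true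
    · rw [idxLoop_none completed opts 0 PySem.Dict.empty hsat]
      by_cases h0 : opts = []
      · simp [h0]
      · rw [if_neg h0, if_pos hsat]
    · have hsat' : opts.any (fun o => completed.contains o) = false := by
        simpa using hsat
      simp only [idxLoop_some completed opts 0 PySem.Dict.empty hsat']
      have hpos : ∀ k, (pvPosOf opts 0 PySem.Dict.empty).getD k opts.length =
          (opts.findIdx? (fun o => k == o)).getD opts.length := by
        intro k
        rw [PySem.Dict.getD_eq_get?_getD, posOf_get? opts 0 PySem.Dict.empty k]
        have hcomm : ∀ o : String, (o == k) = (k == o) := by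
          intro o
          by_cases h : o = k
          · subst h; rfl
          · simp [h, Ne.symm h]
        simp [PySem.Dict.get?_empty, Option.orElse, hcomm]
      have hinit : (none, opts.length) = pvState opts [] := by
        unfold pvState
        have : opts.findIdx? (fun o => ([] : List String).any (fun k' => k' == o)) = none := by
          simp
        rw [this]
      rw [hinit, catLoop_spec (pvPosOf opts 0 PySem.Dict.empty) opts hpos catalog []]
      unfold pvState
      have hpred : (fun o => (([] : List String) ++ catalog.map Prod.fst).any (fun k' => k' == o)) =
          (fun o => catalog.any (fun kv => kv.1 == o)) := by
        funext o
        simp only [List.nil_append, List.any_map]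
        rfl
      rw [hpred, find?_eq_bind]
      by_cases h0 : opts = []
      · simp [h0]
      · rw [if_neg h0, if_neg hsat]
        cases h : opts.findIdx? (fun o => catalog.any (fun kv => kv.1 == o)) <;> simp
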